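-- pv_equiv track=rewrite | github.com/iamez/slomix | scripts/archive/generate_omnibot_botnames.py | assign_names
-- ===== SOURCE A (Python) =====
-- CLASSES = [
--     ("COVERTOPS", "Covert Ops"),
--     ("ENGINEER", "Engineers"),
--     ("FIELDOPS", "Field Ops"),
--     ("MEDIC", "Medics"),
--     ("SOLDIER", "Soldiers"),
-- ]
--
-- def assign_names(names: list[str]) -> tuple[dict[str, list[str]], dict[str, list[str]]]:
--     axis = {cls: [] for cls, _ in CLASSES}
--     allies = {cls: [] for cls, _ in CLASSES}
--     axis_idx = 0
--     allies_idx = 0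
--
--     for idx, name in enumerate(names):
--         if idx % 2 == 0:
--             cls = CLASSES[axis_idx % len(CLASSES)][0]
--             axis[cls].append(name)
--             axis_idx += 1
--         else:
--             cls = CLASSES[allies_idx % len(CLASSES)][0]
--             allies[cls].append(name)
--             allies_idx += 1
--
--     return axis, allies
-- ===== SOURCE B (Python) =====
-- CLASSES = [
--     ("COVERTOPS", "Covert Ops"),
--     ("ENGINEER", "Engineers"),
--     ("FIELDOPS", "Field Ops"),
--     ("MEDIC", "Medics"),
--     ("SOLDIER", "Soldiers"),
-- ]
--
-- def _bucket(lst):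
--     d = {cls: [] for cls, _ in CLASSES}
--     for i, name in enumerate(lst):
--         d[CLASSES[i % 5][0]].append(name)
--     return d
--
-- def assign_names(names: list[str]) -> tuple[dict[str, list[str]], dict[str, list[str]]]:
--     return _bucket(names[::2]), _bucket(names[1::2])
-- ===== Notes on version B (the rewrite author's own statement) =====
-- stated objective: simpler
-- what changed: Instead of one interleaved loop maintaining two side counters and a parity branch, B splits the input by index parity up front (names[::2], names[1::2]) and fills each side's class buckets with one uniform round-robin loop over its slice.
import Mathlib
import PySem

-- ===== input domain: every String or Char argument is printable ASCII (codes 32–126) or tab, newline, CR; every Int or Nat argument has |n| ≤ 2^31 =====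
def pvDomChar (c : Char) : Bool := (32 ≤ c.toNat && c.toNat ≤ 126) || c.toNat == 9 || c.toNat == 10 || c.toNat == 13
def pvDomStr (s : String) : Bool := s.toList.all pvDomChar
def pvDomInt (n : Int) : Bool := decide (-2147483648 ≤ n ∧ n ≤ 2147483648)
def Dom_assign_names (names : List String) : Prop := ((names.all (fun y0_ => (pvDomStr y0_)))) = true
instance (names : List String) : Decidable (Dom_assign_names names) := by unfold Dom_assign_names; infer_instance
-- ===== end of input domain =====

-- B changes the decomposition only (no speed claim): it splits the input by index parity up front
-- and fills each side's buckets with one uniform round-robin loop, instead of A's single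
-- interleaved loop with two side counters and a parity branch.

def pvClasses : List (String × String) :=
  [("COVERTOPS", "Covert Ops"), ("ENGINEER", "Engineers"), ("FIELDOPS", "Field Ops"),
   ("MEDIC", "Medics"), ("SOLDIER", "Soldiers")]

-- ===== PORT A =====
-- axis[cls].append(name) is ported as Dict.modify with default []; exact here because cls is
-- always one of the dict's keys (cls = CLASSES[_ % len(CLASSES)][0] and both dicts hold all keys).
def assign_names (names : List String) : (List (String × List String)) × (List (String × List String)) :=
  let axis : PySem.Dict String (List String) :=
    pvClasses.foldl (fun d p => d.insert p.1 []) PySem.Dict.empty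
  let allies : PySem.Dict String (List String) :=
    pvClasses.foldl (fun d p => d.insert p.1 []) PySem.Dict.empty
  let fin :=
    (PySem.List.enumerate names 0).foldl
      (fun (st : PySem.Dict String (List String) × PySem.Dict String (List String) × Int × Int) p =>
        if PySem.Int.mod p.1 2 = 0 then
          (st.1.modify (PySem.List.pyGetD pvClasses (PySem.Int.mod st.2.2.1 (pvClasses.length : Int)) ("", "")).1
             [] (fun l => l ++ [p.2]), st.2.1, st.2.2.1 + 1, st.2.2.2)
        else
          (st.1, st.2.1.modify (PySem.List.pyGetD pvClasses (PySem.Int.mod st.2.2.2 (pvClasses.length : Int)) ("", "")).1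
             [] (fun l => l ++ [p.2]), st.2.2.1, st.2.2.2 + 1))
      (axis, allies, 0, 0)
  (fin.1.items, fin.2.1.items)

-- ===== PORT B =====
-- d[CLASSES[i % 5][0]].append(name) ported as Dict.modify with default []; exact, the key always exists.
def pvBucket (lst : List String) : PySem.Dict String (List String) :=
  let d : PySem.Dict String (List String) :=
    pvClasses.foldl (fun d p => d.insert p.1 []) PySem.Dict.empty
  (PySem.List.enumerate lst 0).foldl
    (fun d p =>
      d.modify (PySem.List.pyGetD pvClasses (PySem.Int.mod p.1 5) ("", "")).1 [] (fun l => l ++ [p.2]))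
    d

def assign_names_alt (names : List String) : (List (String × List String)) × (List (String × List String)) :=
  ((pvBucket ((PySem.List.slice? names none none 2).getD [])).items,
   (pvBucket ((PySem.List.slice? names (some 1) none 2).getD [])).items)

-- ===== PRECONDITION & SPEC =====
def Spec_assign_names (names : List String) (out : (List (String × List String)) × (List (String × List String))) : Prop := out = assign_names_alt names
instance (names : List String) (out : (List (String × List String)) × (List (String × List String))) : Decidable (Spec_assign_names names out) := by unfold Spec_assign_names; infer_instance

-- ===== CLAIM (what is proved, stated in full; the proofs are below) =====
def Claim_equal_assign_names : Prop := ∀ (names : List String), Dom_assign_names names → Spec_assign_names names (assign_names names)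

-- ===== LEMMAS AND PROOFS =====

-- every-second-element of a list (what names[::2] selects); names[1::2] is pvEv xs.tail
def pvEv {α : Type} : List α → List α
  | [] => []
  | [x] => [x]
  | x :: _ :: xs => x :: pvEv xs

lemma pvEv_cons {α : Type} (x : α) (xs : List α) : pvEv (x :: xs) = x :: pvEv xs.tail := by
  cases xs <;> simp [pvEv]

-- B's bucket loop as a structural recursion carrying the running index
def pvBk (d : PySem.Dict String (List String)) (i : Int) : List String → PySem.Dict String (List String)
  | [] => d
  | x :: xs =>
      pvBk (d.modify (PySem.List.pyGetD pvClasses (PySem.Int.mod i 5) ("", "")).1 [] (fun l => l ++ [x])) (i + 1) xs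

-- A's loop as a structural recursion carrying both dicts, both counters and the running index s
def pvLp (a b : PySem.Dict String (List String)) (ai aj s : Int) :
    List String → PySem.Dict String (List String) × PySem.Dict String (List String) × Int × Int
  | [] => (a, b, ai, aj)
  | x :: xs =>
      if PySem.Int.mod s 2 = 0 then
        pvLp (a.modify (PySem.List.pyGetD pvClasses (PySem.Int.mod ai (pvClasses.length : Int)) ("", "")).1 [] (fun l => l ++ [x]))
          b (ai + 1) aj (s + 1) xs
      else
        pvLp a
          (b.modify (PySem.List.pyGetD pvClasses (PySem.Int.mod aj (pvClasses.length : Int)) ("", "")).1 [] (fun l => l ++ [x]))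
          ai (aj + 1) (s + 1) xs

lemma pvFmod_two (s : Int) : PySem.Int.mod s 2 = 0 ∨ PySem.Int.mod s 2 = 1 := by
  simp [PySem.Int.mod, Int.fmod_eq_emod]
  omega

lemma pvFmod_succ_two (s : Int) : PySem.Int.mod (s + 1) 2 = 1 - PySem.Int.mod s 2 := by
  simp [PySem.Int.mod, Int.fmod_eq_emod]
  omega

lemma pvBucket_enum (lst : List String) :
    ∀ (d : PySem.Dict String (List String)) (i : Int),
      (PySem.List.enumerate lst i).foldl
        (fun d p =>
          d.modify (PySem.List.pyGetD pvClasses (PySem.Int.mod p.1 5) ("", "")).1 [] (fun l => l ++ [p.2]))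
        d = pvBk d i lst := by
  induction lst with
  | nil => intro d i; rfl
  | cons x xs ih =>
      intro d i
      rw [PySem.List.enumerate_cons, List.foldl_cons, pvBk]
      exact ih _ _

lemma pvLp_enum (xs : List String) :
    ∀ (a b : PySem.Dict String (List String)) (ai aj s : Int),
      (PySem.List.enumerate xs s).foldl
        (fun (st : PySem.Dict String (List String) × PySem.Dict String (List String) × Int × Int) p =>
          if PySem.Int.mod p.1 2 = 0 then
            (st.1.modify (PySem.List.pyGetD pvClasses (PySem.Int.mod st.2.2.1 (pvClasses.length : Int)) ("", "")).1
               [] (fun l => l ++ [p.2]), st.2.1, st.2.2.1 + 1, st.2.2.2)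
          else
            (st.1, st.2.1.modify (PySem.List.pyGetD pvClasses (PySem.Int.mod st.2.2.2 (pvClasses.length : Int)) ("", "")).1
               [] (fun l => l ++ [p.2]), st.2.2.1, st.2.2.2 + 1))
        (a, b, ai, aj) = pvLp a b ai aj s xs := by
  induction xs with
  | nil => intro a b ai aj s; rfl
  | cons x xs ih =>
      intro a b ai aj s
      rw [PySem.List.enumerate_cons, List.foldl_cons]
      show List.foldl _
          (if PySem.Int.mod s 2 = 0 then
            (a.modify (PySem.List.pyGetD pvClasses (PySem.Int.mod ai (pvClasses.length : Int)) ("", "")).1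
               [] (fun l => l ++ [x]), b, ai + 1, aj)
          else
            (a, b.modify (PySem.List.pyGetD pvClasses (PySem.Int.mod aj (pvClasses.length : Int)) ("", "")).1
               [] (fun l => l ++ [x]), ai, aj + 1))
          (PySem.List.enumerate xs (s + 1)) = _
      rw [pvLp]
      split_ifs with h
      · exact ih _ _ _ _ _
      · exact ih _ _ _ _ _

lemma pvLen5 : ((pvClasses.length : Nat) : Int) = 5 := by norm_num [pvClasses]

lemma pvLp_eq (xs : List String) :
    ∀ (a b : PySem.Dict String (List String)) (ai aj s : Int),
      (PySem.Int.mod s 2 = 0 →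
        pvLp a b ai aj s xs =
          (pvBk a ai (pvEv xs), pvBk b aj (pvEv xs.tail),
           ai + ((pvEv xs).length : Int), aj + ((pvEv xs.tail).length : Int))) ∧
      (PySem.Int.mod s 2 ≠ 0 →
        pvLp a b ai aj s xs =
          (pvBk a ai (pvEv xs.tail), pvBk b aj (pvEv xs),
           ai + ((pvEv xs.tail).length : Int), aj + ((pvEv xs).length : Int))) := by
  induction xs with
  | nil =>
      intro a b ai aj s
      constructor <;> intro h <;> simp [pvLp, pvEv, pvBk]
  | cons x xs ih =>
      intro a b ai aj s
      constructor <;> intro h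
      · have h2 : PySem.Int.mod (s + 1) 2 ≠ 0 := by rw [pvFmod_succ_two, h]; norm_num
        rw [pvLp, if_pos h, pvLen5]
        rw [(ih _ b (ai + 1) aj (s + 1)).2 h2]
        simp [pvEv_cons, pvBk]
        omega
      · have h2 : PySem.Int.mod (s + 1) 2 = 0 := by
          rcases pvFmod_two s with h0 | h1
          · exact absurd h0 h
          · rw [pvFmod_succ_two, h1]; norm_num
        rw [pvLp, if_neg h, pvLen5]
        rw [(ih a _ ai (aj + 1) (s + 1)).1 h2]
        simp [pvEv_cons, pvBk]
        omega

-- evens of a list as the filterMap that slice? produces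
lemma pvFilterMap_even {α : Type} (xs : List α) :
    List.filterMap (fun k => xs[2 * k]?) (List.range ((xs.length + 1) / 2)) = pvEv xs := by
  induction xs using pvEv.induct with
  | case1 => simp [pvEv]
  | case2 x => simp [pvEv, List.range_succ]
  | case3 x y xs ih =>
      have hlen : ((x :: y :: xs).length + 1) / 2 = (xs.length + 1) / 2 + 1 := by
        simp [List.length_cons]; omega
      rw [hlen, List.range_succ_eq_map, List.filterMap_cons]
      simp only [Nat.mul_zero, List.getElem?_cons_zero]
      rw [List.filterMap_map]
      have hfun : ∀ k ∈ List.range ((xs.length + 1) / 2),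
          ((fun k => (x :: y :: xs)[2 * k]?) ∘ Nat.succ) k = (fun k => xs[2 * k]?) k := by
        intro k _
        have h2 : 2 * Nat.succ k = (2 * k + 1) + 1 := by omega
        simp only [Function.comp, h2, List.getElem?_cons_succ]
      rw [List.filterMap_congr hfun, ih]
      rfl

lemma pvSlice_even (xs : List String) :
    PySem.List.slice? xs none none 2 = some (pvEv xs) := by
  simp only [PySem.List.slice?, PySem.List.sliceIndices]
  norm_num
  have hif : (if 0 < xs.length then (((xs.length : Int) + 2 - 1) / 2).toNat else 0)
      = (xs.length + 1) / 2 := by split_ifs with h <;> omega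
  have hf : ∀ k : Nat, ((2 : Int) * (k : Int)).toNat = 2 * k := by intro k; omega
  rw [hif]
  simp only [hf]
  exact pvFilterMap_even xs

lemma pvSlice_odd (xs : List String) :
    PySem.List.slice? xs (some 1) none 2 = some (pvEv xs.tail) := by
  cases xs with
  | nil => decide
  | cons y ys =>
      simp only [PySem.List.slice?, PySem.List.sliceIndices]
      norm_num
      have hif : (if 0 < ys.length then (((ys.length : Int) + 2 - 1) / 2).toNat else 0)
          = (ys.length + 1) / 2 := by split_ifs with h <;> omega
      have hf : ∀ k : Nat, ((1 : Int) + 2 * (k : Int)).toNat = 2 * k + 1 := by intro k; omega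
      rw [hif]
      simp only [hf, List.getElem?_cons_succ]
      exact pvFilterMap_even ys

-- ===== VERDICT (by name: the statement is the Claim_ definition above) =====
theorem assign_names_spec : Claim_equal_assign_names := by
  intro names _
  unfold Spec_assign_names
  simp only [assign_names, assign_names_alt, pvBucket]
  rw [pvSlice_even, pvSlice_odd]
  simp only [Option.getD_some]
  rw [pvBucket_enum, pvBucket_enum, pvLp_enum]
  rw [(pvLp_eq names _ _ 0 0 0).1 (by decide)]
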